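-- pv_equiv track=rewrite | github.com/ndunnett/aoc | python/2022/day10.py | parse
-- ===== SOURCE A (Python) =====
-- def parse(input: str) -> dict[int, int]:
--     lines = input.splitlines()
--     data, cycle, register = dict(), 0, 1
--
--     for line in lines:
--         match line.strip().split(" "):
--             case ["addx", value]:
--                 for _ in range(2):
--                     cycle += 1
--                     data[cycle] = register
--                 register += int(value)
--
--             case ["noop"]:
--                 cycle += 1
--                 data[cycle] = register
--
--     return data
-- ===== SOURCE B (Python) =====
-- from itertools import accumulate
--
--
-- def _deltas(line: str) -> list[int]:
--     parts = line.strip().split(" ")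
--     if parts == ["noop"]:
--         return [0]
--     if len(parts) == 2 and parts[0] == "addx":
--         return [0, int(parts[1])]
--     return []
--
--
-- def parse(input: str) -> dict[int, int]:
--     deltas = [d for line in input.splitlines() for d in _deltas(line)]
--     values = list(accumulate(deltas, initial=1))[:-1]
--     return {cycle: v for cycle, v in enumerate(values, start=1)}
-- ===== Notes on version B (the rewrite author's own statement) =====
-- stated objective: alternative
-- what changed: Replaces A's single stateful simulation (mutating cycle/register while writing the dict) by two staged passes: flatten the program into a list of per-cycle register deltas, then enumerate its running prefix sums starting at cycle 1; Pre_ excludes only the inputs on which both Pythons raise ValueError (an addx line with a non-integer operand).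
-- outside the precondition, e.g. on parse('addx v'): A raises ValueError, B raises ValueError
import Mathlib
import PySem

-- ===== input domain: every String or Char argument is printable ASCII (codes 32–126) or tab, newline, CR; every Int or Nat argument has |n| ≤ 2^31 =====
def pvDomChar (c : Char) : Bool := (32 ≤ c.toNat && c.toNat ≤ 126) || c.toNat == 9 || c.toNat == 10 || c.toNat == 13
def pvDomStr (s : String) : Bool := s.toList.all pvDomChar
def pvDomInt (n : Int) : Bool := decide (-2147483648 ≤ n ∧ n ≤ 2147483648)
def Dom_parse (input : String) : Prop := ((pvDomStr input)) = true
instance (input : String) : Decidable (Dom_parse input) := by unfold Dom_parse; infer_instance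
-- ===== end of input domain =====

-- B replaces A's single stateful cycle/register simulation by two staged passes: a flat
-- list of per-cycle register deltas, then its running prefix sums enumerated from cycle 1
-- (objective: alternative decomposition, same cost).

-- ===== PORT A =====
-- single fold over the lines carrying (data, cycle, register), as in A
def parse (input : String) : List (Int × Int) :=
  let lines := PySem.Str.splitlines input
  let st := lines.foldl
    (fun (st : PySem.Dict Int Int × Int × Int) line =>
      let data := st.1
      let cycle := st.2.1
      let register := st.2.2
      -- line.strip().split(" "): sep ≠ "" so split? is always `some`
      match (PySem.Str.split? (PySem.Str.strip line) " ").getD [] with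
      | ["addx", value] =>
          let q := (List.range 2).foldl
            (fun (q : PySem.Dict Int Int × Int) _ =>
              let c := q.2 + 1
              (q.1.insert c register, c)) (data, cycle)
          -- int(value): ValueError (none) is excluded by Pre_parse
          (q.1, q.2, register + (PySem.Int.ofStr? value).getD 0)
      | ["noop"] =>
          let c := cycle + 1
          (data.insert c register, c, register)
      | _ => (data, cycle, register))
    (PySem.Dict.empty, 0, 1)
  st.1.items

-- ===== PORT B =====
-- per-line register deltas: noop contributes [0], addx v contributes [0, v]
def deltasOf (line : String) : List Int :=
  let parts := (PySem.Str.split? (PySem.Str.strip line) " ").getD []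
  if parts = ["noop"] then [0]
  else if parts.length = 2 ∧ parts.getD 0 "" = "addx" then
    -- int(parts[1]): ValueError (none) is excluded by Pre_parse
    [0, (PySem.Int.ofStr? (parts.getD 1 "")).getD 0]
  else []

def parse_alt (input : String) : List (Int × Int) :=
  let deltas := (PySem.Str.splitlines input).flatMap deltasOf
  let values := (deltas.scanl (· + ·) 1).dropLast
  PySem.List.enumerate values 1

-- ===== PRECONDITION & SPEC =====
-- Pre_ excludes exactly the inputs on which the Python A raises ValueError: a line of the
-- form "addx v" whose v is not a valid int literal (B's Python raises there as well).
def Pre_parse (input : String) : Prop :=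
  (PySem.Str.splitlines input).all
    (fun line =>
      let parts := (PySem.Str.split? (PySem.Str.strip line) " ").getD []
      !(parts.length == 2 && parts.getD 0 "" == "addx")
        || (PySem.Int.ofStr? (parts.getD 1 "")).isSome) = true
instance (input : String) : Decidable (Pre_parse input) := by unfold Pre_parse; infer_instance
def pvWitness_parse : String := "noop\naddx 3\naddx -5\nnoop"
def Spec_parse (input : String) (out : List (Int × Int)) : Prop := out = parse_alt input
instance (input : String) (out : List (Int × Int)) : Decidable (Spec_parse input out) := by unfold Spec_parse; infer_instance

-- ===== CLAIM (what is proved, stated in full; the proofs are below) =====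
def Claim_equal_parse : Prop := ∀ (input : String), Dom_parse input → Pre_parse input → Spec_parse input (parse input)

-- ===== LEMMAS AND PROOFS =====

-- A's loop body, named for the proofs (definitionally the lambda inside `parse`)
def stepA (st : PySem.Dict Int Int × Int × Int) (line : String) :
    PySem.Dict Int Int × Int × Int :=
  let data := st.1
  let cycle := st.2.1
  let register := st.2.2
  match (PySem.Str.split? (PySem.Str.strip line) " ").getD [] with
  | ["addx", value] =>
      let q := (List.range 2).foldl
        (fun (q : PySem.Dict Int Int × Int) _ =>
          let c := q.2 + 1
          (q.1.insert c register, c)) (data, cycle)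
      (q.1, q.2, register + (PySem.Int.ofStr? value).getD 0)
  | ["noop"] =>
      let c := cycle + 1
      (data.insert c register, c, register)
  | _ => (data, cycle, register)

theorem parse_eq (input : String) :
    parse input = ((PySem.Str.splitlines input).foldl stepA (PySem.Dict.empty, 0, 1)).1.items := rfl

-- The cycle→register entries produced after `ds` deltas, starting at cycle c, register r.
def entries (c r : Int) : List Int → List (Int × Int)
  | [] => []
  | d :: ds => (c + 1, r) :: entries (c + 1) (r + d) ds

theorem entries_append (c r : Int) (ds es : List Int) :
    entries c r (ds ++ es) = entries c r ds ++ entries (c + ds.length) (r + ds.sum) es := by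
  induction ds generalizing c r with
  | nil => simp [entries]
  | cons d ds ih => simp [entries, ih (c + 1) (r + d)]; ring_nf

theorem entries_key_bounds (c r : Int) (ds : List Int) :
    ∀ k ∈ (entries c r ds).map Prod.fst, c < k ∧ k ≤ c + ds.length := by
  induction ds generalizing c r with
  | nil => simp [entries]
  | cons d ds ih =>
    intro k hk
    simp only [entries, List.map_cons, List.mem_cons] at hk
    rcases hk with h | h
    · subst h; simp only [List.length_cons]; push_cast; omega
    · have := ih (c + 1) (r + d) k h
      simp only [List.length_cons]
      push_cast at this ⊢
      omega

theorem insert_fresh (es : List (Int × Int)) (k : Int) (v : Int)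
    (h : k ∉ es.map Prod.fst) :
    (PySem.Dict.mk es).insert k v = PySem.Dict.mk (es ++ [(k, v)]) := by
  apply PySem.Dict.ext
  have hc : (PySem.Dict.mk es).contains k = false := by
    cases hcc : (PySem.Dict.mk es).contains k
    · rfl
    · rw [PySem.Dict.contains_iff_mem_keys, PySem.Dict.keys_mk] at hcc
      exact absurd hcc h
  rw [PySem.Dict.items_insert_of_not_contains _ _ hc]

-- dropLast of the running prefix sums, enumerated from c+1, is `entries c r ds`.
theorem enumerate_scanl (c r : Int) (ds : List Int) :
    PySem.List.enumerate ((ds.scanl (· + ·) r).dropLast) (c + 1) = entries c r ds := by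
  induction ds generalizing c r with
  | nil => simp [entries]
  | cons d ds ih =>
    have hne : (ds.scanl (· + ·) (r + d)) ≠ [] := by
      cases ds <;> simp [List.scanl]
    rw [List.scanl_cons, List.dropLast_cons_of_ne_nil hne,
        PySem.List.enumerate_cons, ih (c + 1) (r + d)]
    rfl

-- one step of A advances the `entries` state by that line's deltas
theorem stepA_inv (line : String) (ds : List Int) :
    stepA (PySem.Dict.mk (entries 0 1 ds), (ds.length : Int), 1 + ds.sum) line
      = (PySem.Dict.mk (entries 0 1 (ds ++ deltasOf line)),
         ((ds ++ deltasOf line).length : Int), 1 + (ds ++ deltasOf line).sum) := by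
  have hfresh1 : ((ds.length : Int)) + 1 ∉ (entries 0 1 ds).map Prod.fst := by
    intro hmem
    have := entries_key_bounds 0 1 ds _ hmem
    omega
  have hfresh2 : ((ds.length : Int)) + 2
      ∉ ((entries 0 1 ds) ++ [(((ds.length : Int)) + 1, 1 + ds.sum)]).map Prod.fst := by
    intro hmem
    simp only [List.map_append, List.mem_append, List.map_cons, List.map_nil,
      List.mem_singleton] at hmem
    rcases hmem with h | h
    · have := entries_key_bounds 0 1 ds _ h; omega
    · omega
  cases hsplit : (PySem.Str.split? (PySem.Str.strip line) " ").getD [] with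
  | nil =>
    have hd : deltasOf line = [] := by simp [deltasOf, hsplit]
    simp [stepA, hsplit, hd]
  | cons a tl =>
    cases tl with
    | nil =>
      by_cases ha : a = "noop"
      · subst ha
        have hd : deltasOf line = [0] := by simp [deltasOf, hsplit]
        rw [hd]
        unfold stepA
        rw [hsplit]
        simp only [Prod.mk.injEq]
        refine ⟨?_, ?_, ?_⟩
        · rw [insert_fresh _ _ _ hfresh1, entries_append]
          simp [entries]
        · simp only [List.length_append, List.length_cons, List.length_nil]
          push_cast; ring
        · simp
      · have hd : deltasOf line = [] := by
          simp [deltasOf, hsplit, ha]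
        rw [hd, List.append_nil]
        unfold stepA
        rw [hsplit]
        split <;> simp_all
    | cons v tl2 =>
      cases tl2 with
      | nil =>
        by_cases ha : a = "addx"
        · subst ha
          have hd : deltasOf line = [0, (PySem.Int.ofStr? v).getD 0] := by
            simp [deltasOf, hsplit]
          rw [hd]
          unfold stepA
          rw [hsplit]
          simp only [show List.range 2 = [0, 1] from rfl, List.foldl_cons, List.foldl_nil,
            Prod.mk.injEq]
          refine ⟨?_, ?_, ?_⟩
          · rw [insert_fresh _ _ _ hfresh1,
              show ((ds.length : Int) + 1 + 1) = ((ds.length : Int) + 2) from by ring,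
              insert_fresh _ _ _ hfresh2, entries_append]
            simp [entries]
            ring
          · simp only [List.length_append, List.length_cons, List.length_nil]
            push_cast; ring
          · simp only [List.sum_append, List.sum_cons, List.sum_nil]
            ring
        · have hd : deltasOf line = [] := by
            simp [deltasOf, hsplit, ha]
          rw [hd, List.append_nil]
          unfold stepA
          rw [hsplit]
          split <;> simp_all
      | cons w tl3 =>
        have hd : deltasOf line = [] := by
          simp [deltasOf, hsplit]
        rw [hd, List.append_nil]
        unfold stepA
        rw [hsplit]
        split <;> simp_all

theorem foldA_inv (lines : List String) (ds : List Int) :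
    lines.foldl stepA (PySem.Dict.mk (entries 0 1 ds), (ds.length : Int), 1 + ds.sum)
      = (PySem.Dict.mk (entries 0 1 (ds ++ lines.flatMap deltasOf)),
         ((ds ++ lines.flatMap deltasOf).length : Int),
         1 + (ds ++ lines.flatMap deltasOf).sum) := by
  induction lines generalizing ds with
  | nil => simp only [List.foldl_nil, List.flatMap_nil, List.append_nil]
  | cons line rest ih =>
    rw [List.foldl_cons, stepA_inv line ds, ih (ds ++ deltasOf line)]
    simp only [List.flatMap_cons, List.append_assoc]

-- ===== VERDICT (by name: the statement is the Claim_ definition above) =====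
theorem parse_spec : Claim_equal_parse := by
  intro input _ _
  unfold Spec_parse
  simp only [parse_alt]
  rw [parse_eq]
  have h := foldA_inv (PySem.Str.splitlines input) []
  simp only [List.nil_append, List.length_nil, List.sum_nil, Nat.cast_zero, add_zero] at h
  have h0 : ((PySem.Dict.empty : PySem.Dict Int Int), (0 : Int), (1 : Int))
      = (PySem.Dict.mk (entries 0 1 []), (0 : Int), (1 : Int)) := rfl
  rw [h0]
  rw [show entries 0 1 [] = [] from rfl] at h ⊢
  rw [h]
  show entries 0 1 ((PySem.Str.splitlines input).flatMap deltasOf) = _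
  rw [← enumerate_scanl 0 1]
  norm_num
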